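-- pv_equiv track=rewrite | github.com/MustaGitRefresh/PythonRevision | DecimalHorrifyNumber.py | is_scary_number
-- ===== SOURCE A (Python) =====
-- def is_scary_number(number):
--     count_13 = 0
--     while number > 0:
--         last_two_digits = number % 100
--         if last_two_digits == 13:
--             count_13 += 1
--             if count_13 > 1:
--                 return False
--         number //= 10
--     return count_13 == 1
-- ===== SOURCE B (Python) =====
-- def is_scary_number(number):
--     if number <= 0:
--         return False
--     s = str(number)
--     return sum(1 for a, b in zip(s, s[1:]) if a + b == '13') == 1
-- ===== Notes on version B (the rewrite author's own statement) =====
-- stated objective: simpler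
-- what changed: B replaces A's arithmetic while-loop (repeatedly taking the last two digits with a mutable counter and early exit) by converting the number to its decimal string once and counting adjacent ('1','3') character pairs via zip, comparing the total to 1.
import Mathlib
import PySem

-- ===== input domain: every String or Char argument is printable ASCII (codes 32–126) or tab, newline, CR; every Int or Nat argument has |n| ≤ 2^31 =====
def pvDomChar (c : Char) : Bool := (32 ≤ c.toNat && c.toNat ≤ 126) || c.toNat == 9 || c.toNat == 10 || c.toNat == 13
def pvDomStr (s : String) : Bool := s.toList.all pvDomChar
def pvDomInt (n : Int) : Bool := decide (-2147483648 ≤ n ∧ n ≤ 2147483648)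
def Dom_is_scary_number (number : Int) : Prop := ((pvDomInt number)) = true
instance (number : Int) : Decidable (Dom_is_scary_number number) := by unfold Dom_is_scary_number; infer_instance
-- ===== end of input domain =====

-- B replaces A's arithmetic last-two-digits loop (with mutable counter and early exit) by counting
-- adjacent '1','3' pairs of the decimal string with zip; objective: simpler. Equivalence proved for all inputs.

-- ===== PORT A =====
-- the while-loop of A: state = (number, count_13); early 'return False' when count exceeds 1
def isLoopA (n c : Int) : Bool :=
  if h : 0 < n then
    let last_two_digits := PySem.Int.mod n 100
    if last_two_digits = 13 then
      if c + 1 > 1 then false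
      else isLoopA (PySem.Int.floordiv n 10) (c + 1)
    else isLoopA (PySem.Int.floordiv n 10) c
  else decide (c = 1)
termination_by n.toNat
decreasing_by
  all_goals
    rw [PySem.Int.floordiv_eq_ediv_of_pos (by omega)]
    omega

def is_scary_number (number : Int) : Bool := isLoopA number 0

-- ===== PORT B =====
def is_scary_number_alt (number : Int) : Bool :=
  if number ≤ 0 then false
  else
    let s := (PySem.Int.toStr number).toList
    decide ((s.zip (PySem.List.slice s (some 1) none)).countP
      (fun p => p.1 == '1' && p.2 == '3') = 1)

-- ===== PRECONDITION & SPEC =====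
def Spec_is_scary_number (number : Int) (out : Bool) : Prop := out = is_scary_number_alt number
instance (number : Int) (out : Bool) : Decidable (Spec_is_scary_number number out) := by unfold Spec_is_scary_number; infer_instance

-- ===== CLAIM (what is proved, stated in full; the proofs are below) =====
def Claim_equal_is_scary_number : Prop := ∀ (number : Int), Dom_is_scary_number number → Spec_is_scary_number number (is_scary_number number)

-- ===== LEMMAS AND PROOFS =====

-- total number of suffix positions of m ending in the two digits 1,3 (A's count without early exit)
def pcN (m : Nat) : Nat :=
  if m = 0 then 0
  else (if m % 100 = 13 then 1 else 0) + pcN (m / 10)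
termination_by m
decreasing_by exact Nat.div_lt_self (by omega) (by omega)

lemma pcN_zero : pcN 0 = 0 := by rw [pcN]; simp

lemma pcN_pos {m : Nat} (hm : m ≠ 0) :
    pcN m = (if m % 100 = 13 then 1 else 0) + pcN (m / 10) := by
  rw [pcN, if_neg hm]

-- adjacent ('1','3') pairs of a char list (what B's zip-count computes)
def pairs13 (s : List Char) : Nat :=
  (s.zip s.tail).countP (fun p => p.1 == '1' && p.2 == '3')

lemma pairs13_single (c : Char) : pairs13 [c] = 0 := rfl

lemma pairs13_cons₂ (x y : Char) (l : List Char) :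
    pairs13 (x :: y :: l) = (if x == '1' && y == '3' then 1 else 0) + pairs13 (y :: l) := by
  simp only [pairs13, List.zip_cons_cons, List.tail_cons, List.countP_cons]
  cases h : (x == '1' && y == '3') <;> simp [h]; omega

lemma pairs13_snoc_snoc (t : List Char) (a c : Char) :
    pairs13 (t ++ [a] ++ [c]) = pairs13 (t ++ [a]) + (if a == '1' && c == '3' then 1 else 0) := by
  induction t with
  | nil =>
    rw [show ([] : List Char) ++ [a] ++ [c] = a :: c :: [] from rfl,
        show ([] : List Char) ++ [a] = [a] from rfl, pairs13_cons₂, pairs13_single,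
        pairs13_single]
    omega
  | cons x t ih =>
    cases t with
    | nil =>
      rw [show [x] ++ [a] ++ [c] = x :: a :: c :: [] from rfl,
          show [x] ++ [a] = x :: a :: [] from rfl,
          pairs13_cons₂, pairs13_cons₂, pairs13_cons₂, pairs13_single, pairs13_single]
      omega
    | cons y t' =>
      simp only [List.cons_append] at ih ⊢
      rw [pairs13_cons₂, pairs13_cons₂, ih]
      omega

-- Nat.toDigitsCore: accumulator append
lemma tdc_acc (f : Nat) : ∀ (n : Nat) (ds : List Char),
    Nat.toDigitsCore 10 f n ds = Nat.toDigitsCore 10 f n [] ++ ds := by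
  induction f with
  | zero => intro n ds; simp [Nat.toDigitsCore]
  | succ f ih =>
    intro n ds
    simp only [Nat.toDigitsCore]
    by_cases h : n / 10 = 0
    · simp [h]
    · simp only [h, if_neg h]
      rw [ih (n / 10) (Nat.digitChar (n % 10) :: ds), ih (n / 10) [Nat.digitChar (n % 10)]]
      simp

-- Nat.toDigitsCore: fuel irrelevance
lemma tdc_fuel (f : Nat) : ∀ (g n : Nat) (ds : List Char), n < f → n < g →
    Nat.toDigitsCore 10 f n ds = Nat.toDigitsCore 10 g n ds := by
  induction f with
  | zero => intro g n ds h; omega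
  | succ f ih =>
    intro g n ds hf hg
    cases g with
    | zero => omega
    | succ g =>
      simp only [Nat.toDigitsCore]
      by_cases h : n / 10 = 0
      · simp [h]
      · simp only [h, if_neg h]
        exact ih g (n / 10) _ (by omega) (by omega)

lemma toDigits_small {m : Nat} (h : m < 10) : Nat.toDigits 10 m = [Nat.digitChar m] := by
  simp [Nat.toDigits, Nat.toDigitsCore, Nat.div_eq_of_lt h, Nat.mod_eq_of_lt h]

lemma toDigits_step {m : Nat} (h : 10 ≤ m) :
    Nat.toDigits 10 m = Nat.toDigits 10 (m / 10) ++ [Nat.digitChar (m % 10)] := by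
  have hne : m / 10 ≠ 0 := by omega
  have h1 : Nat.toDigits 10 m = Nat.toDigitsCore 10 m (m / 10) [Nat.digitChar (m % 10)] := by
    rw [Nat.toDigits]
    conv_lhs => rw [Nat.toDigitsCore]
    simp [hne]
  rw [h1, tdc_acc m (m / 10) [Nat.digitChar (m % 10)], Nat.toDigits,
      tdc_fuel m (m / 10 + 1) (m / 10) [] (by omega) (by omega)]

lemma toDigits_last (k : Nat) (hk : 0 < k) :
    ∃ t, Nat.toDigits 10 k = t ++ [Nat.digitChar (k % 10)] := by
  by_cases h : k < 10
  · exact ⟨[], by simp [toDigits_small h, Nat.mod_eq_of_lt h]⟩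
  · exact ⟨Nat.toDigits 10 (k / 10), toDigits_step (by omega)⟩

lemma digitChar_pair (d e : Nat) (hd : d < 10) (he : e < 10) :
    ((Nat.digitChar d == '1') && (Nat.digitChar e == '3')) = decide (d = 1 ∧ e = 3) := by
  have h1 : (Nat.digitChar d == '1') = decide (d = 1) := by interval_cases d <;> decide
  have h3 : (Nat.digitChar e == '3') = decide (e = 3) := by interval_cases e <;> decide
  rw [h1, h3]
  simp

-- bridge: A's total count over the digits of m = B's adjacent-pair count of m's decimal string
lemma pcN_eq_pairs13 (m : Nat) (hm : 0 < m) : pcN m = pairs13 (Nat.toDigits 10 m) := by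
  induction m using Nat.strong_induction_on with
  | _ m ih =>
    by_cases h : m < 10
    · rw [toDigits_small h, pairs13_single, pcN_pos (by omega : m ≠ 0),
          Nat.div_eq_of_lt h, pcN_zero, Nat.mod_eq_of_lt (by omega : m < 100),
          if_neg (by omega : ¬ m = 13)]
    · have h10 : 10 ≤ m := by omega
      have hq : 0 < m / 10 := by omega
      obtain ⟨t, ht⟩ := toDigits_last (m / 10) hq
      rw [toDigits_step h10, ht, pairs13_snoc_snoc, ← ht, ← ih (m / 10) (by omega) hq]
      rw [digitChar_pair _ _ (Nat.mod_lt _ (by omega)) (Nat.mod_lt _ (by omega))]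
      rw [pcN]
      simp only [if_neg (by omega : ¬ m = 0)]
      have hiff : m % 100 = 13 ↔ (m / 10 % 10 = 1 ∧ m % 10 = 3) := by omega
      by_cases h13 : m % 100 = 13
      · simp [h13, hiff.mp h13]; omega
      · have : ¬ (m / 10 % 10 = 1 ∧ m % 10 = 3) := fun hc => h13 (hiff.mpr hc)
        simp [h13, this]

-- A's loop computes: count so far + total remaining count, compared with 1
lemma isLoopA_eq (k : Nat) : ∀ (n c : Int), n.toNat ≤ k → 0 ≤ c →
    isLoopA n c = decide (c + (pcN n.toNat : Int) = 1) := by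
  induction k with
  | zero =>
    intro n c hk hc
    rw [isLoopA]
    have hn : ¬ 0 < n := by omega
    have h0 : n.toNat = 0 := by omega
    simp only [dif_neg hn, h0, pcN_zero, Nat.cast_zero]
    rw [decide_eq_decide]
    omega
  | succ k ih =>
    intro n c hk hc
    rw [isLoopA]
    by_cases hn : 0 < n
    · simp only [dif_pos hn]
      have hmod : PySem.Int.mod n 100 = n % 100 := PySem.Int.mod_eq_emod_of_pos (by omega)
      have hdiv : PySem.Int.floordiv n 10 = n / 10 := PySem.Int.floordiv_eq_ediv_of_pos (by omega)
      have htn : (n / 10).toNat = n.toNat / 10 := by omega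
      have hb : (n / 10).toNat ≤ k := by omega
      simp only [hmod, hdiv]
      by_cases h13 : n % 100 = 13
      · have h13' : n.toNat % 100 = 13 := by omega
        have hpc : pcN n.toNat = 1 + pcN (n.toNat / 10) := by
          rw [pcN_pos (by omega : n.toNat ≠ 0), if_pos h13']
        by_cases hgt : c + 1 > 1
        · simp only [if_pos h13, if_pos hgt]
          rw [eq_comm, decide_eq_false_iff_not]
          have : (0 : Int) ≤ (pcN (n.toNat / 10) : Int) := Int.natCast_nonneg _
          omega
        · simp only [if_pos h13, if_neg hgt]
          rw [ih (n / 10) (c + 1) hb (by omega), htn, decide_eq_decide]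
          omega
      · have h13' : ¬ n.toNat % 100 = 13 := by omega
        have hpc : pcN n.toNat = pcN (n.toNat / 10) := by
          rw [pcN_pos (by omega : n.toNat ≠ 0), if_neg h13', Nat.zero_add]
        simp only [if_neg h13]
        rw [ih (n / 10) c hb hc, htn, decide_eq_decide]
        omega
    · have h0 : n.toNat = 0 := by omega
      simp only [dif_neg hn, h0, pcN_zero, Nat.cast_zero]
      rw [decide_eq_decide]
      omega

-- ===== VERDICT (by name: the statement is the Claim_ definition above) =====
theorem is_scary_number_spec : Claim_equal_is_scary_number := by
  intro number _
  unfold Spec_is_scary_number is_scary_number is_scary_number_alt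
  by_cases hle : number ≤ 0
  · rw [isLoopA]
    simp [hle]
  · have hpos : 0 < number := by omega
    rw [isLoopA_eq number.toNat number 0 le_rfl le_rfl]
    simp only [if_neg hle]
    have hts : (PySem.Int.toStr number).toList = Nat.toDigits 10 number.toNat := by
      rw [PySem.Int.toList_toStr, PySem.Int.toChars, if_neg (by omega : ¬ number < 0)]
    simp only [hts, PySem.List.slice_from_one]
    show _ = decide (pairs13 (Nat.toDigits 10 number.toNat) = 1)
    rw [← pcN_eq_pairs13 _ (by omega), decide_eq_decide]
    omega
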